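-- pv_equiv track=rewrite | github.com/imaginethinking/lunar-somnio | lunar_somnio/views.py | get_top_emotion
-- ===== SOURCE A (Python) =====
-- EMOTION_KEYWORDS = {
--     'anger': ['angry', 'rage', 'furious', 'mad', 'hate', 'yell', 'fight', 'violent',
--               'scream', 'attack', 'punch', 'hit', 'frustrat', 'annoy', 'resent',
--               'bitter', 'hostile', 'aggressive', 'explode', 'revenge'],
--
--     'disgust': ['disgusting', 'gross', 'sick', 'vomit', 'dirty', 'ugly', 'horrible',
--                 'nasty', 'revolting', 'filthy', 'stink', 'rot', 'decay', 'trash',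
--                 'repuls', 'awful', 'disturbing', 'nauseating', 'yuck', 'creepy'],
--
--     'fear': ['scared', 'afraid', 'terror', 'nightmare', 'monster', 'dark', 'run',
--              'chase', 'hiding', 'panic', 'danger', 'threat', 'scream', 'trap',
--              'escape', 'ghost', 'shadow', 'lost', 'alone', 'horror', 'dread',
--              'anxiety', 'helpless', 'frozen', 'paralyz', 'evil', 'demon'],
--
--     'happiness': ['happy', 'joy', 'laugh', 'smile', 'love', 'fun', 'excited', 'celebrate',
--                   'wonderful', 'amazing', 'beautiful', 'warm', 'hug', 'peace', 'free',
--                   'flying', 'dance', 'music', 'friend', 'family', 'sunshine', 'bright',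
--                   'paradise', 'perfect', 'bliss', 'delight', 'content', 'grateful'],
--
--     'sadness': ['sad', 'cry', 'loss', 'miss', 'grief', 'lonely', 'tears', 'hurt',
--                 'broken', 'empty', 'hopeless', 'depress', 'mourn', 'goodbye', 'death',
--                 'dead', 'die', 'regret', 'disappoint', 'forget', 'left', 'abandon',
--                 'reject', 'fail', 'lose', 'gone', 'never', 'wish'],
--
--     'neutral': ['walk', 'talk', 'sit', 'stand', 'look', 'see', 'hear', 'think',
--                 'normal', 'ordinary', 'usual', 'everyday', 'just', 'simply'],
-- }
--
-- def get_top_emotion(text):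
--     text_lowercase = text.lower()
--     emotion_scores = {emotion: 0 for emotion in EMOTION_KEYWORDS}
--
--     for emotion, keywords in EMOTION_KEYWORDS.items():
--         for word in keywords:
--             if word in text_lowercase:
--                 emotion_scores[emotion] += 1
--
--     top = max(emotion_scores, key=emotion_scores.get)
--
--     return top if emotion_scores[top] > 0 else 'neutral'
-- ===== SOURCE B (Python) =====
-- _KEYWORDS = [
--     ('anger', 'angry rage furious mad hate yell fight violent scream attack punch hit frustrat annoy resent bitter hostile aggressive explode revenge'),
--     ('disgust', 'disgusting gross sick vomit dirty ugly horrible nasty revolting filthy stink rot decay trash repuls awful disturbing nauseating yuck creepy'),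
--     ('fear', 'scared afraid terror nightmare monster dark run chase hiding panic danger threat scream trap escape ghost shadow lost alone horror dread anxiety helpless frozen paralyz evil demon'),
--     ('happiness', 'happy joy laugh smile love fun excited celebrate wonderful amazing beautiful warm hug peace free flying dance music friend family sunshine bright paradise perfect bliss delight content grateful'),
--     ('sadness', 'sad cry loss miss grief lonely tears hurt broken empty hopeless depress mourn goodbye death dead die regret disappoint forget left abandon reject fail lose gone never wish'),
--     ('neutral', 'walk talk sit stand look see hear think normal ordinary usual everyday just simply'),
-- ]
--
-- _MAX_LEN = max(len(w) for _, ws in _KEYWORDS for w in ws.split())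
--
--
-- def get_top_emotion(text):
--     # Index every substring of the lowered text up to the longest keyword length,
--     # then score each emotion by set lookups and keep the first strict maximum.
--     t = text.lower()
--     n = len(t)
--     subs = set()
--     for i in range(n):
--         for L in range(1, min(_MAX_LEN, n - i) + 1):
--             subs.add(t[i:i + L])
--     best_emotion, best = 'neutral', 0
--     for emotion, words in _KEYWORDS:
--         score = 0
--         for w in words.split():
--             if w in subs:
--                 score += 1
--         if score > best:
--             best_emotion, best = emotion, score
--     return best_emotion
-- ===== Notes on version B (the rewrite author's own statement) =====
-- stated objective: alternative
-- what changed: B builds one set of all substrings of the lowered text up to the longest keyword length and scores each emotion by set lookups over its own flat keyword table (space-separated strings split at runtime), replacing the 127 independent substring-containment scans of A, and replaces the max-over-dict plus the positive-score check by a single running strict-maximum fold seeded with the pair (neutral, 0).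
import Mathlib
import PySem

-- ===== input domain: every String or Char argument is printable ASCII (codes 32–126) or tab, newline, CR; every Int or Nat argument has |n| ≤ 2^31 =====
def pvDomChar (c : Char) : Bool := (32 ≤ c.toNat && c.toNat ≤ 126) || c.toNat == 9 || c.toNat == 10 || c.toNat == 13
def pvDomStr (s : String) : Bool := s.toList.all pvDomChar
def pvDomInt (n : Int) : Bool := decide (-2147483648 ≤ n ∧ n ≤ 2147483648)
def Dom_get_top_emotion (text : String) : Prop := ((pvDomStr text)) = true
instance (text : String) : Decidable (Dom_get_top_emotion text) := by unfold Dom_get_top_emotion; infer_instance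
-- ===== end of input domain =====

-- B replaces A's 127 independent substring scans by one substring index (a set of all
-- substrings up to the longest-keyword length) queried per keyword from B's own flat
-- keyword table, and replaces max(dict, key=…) by a running strict-maximum fold;
-- alternative algorithm, not faster.

-- ===== PORT A =====
def KW_anger : List String := ["angry", "rage", "furious", "mad", "hate", "yell", "fight", "violent",
  "scream", "attack", "punch", "hit", "frustrat", "annoy", "resent",
  "bitter", "hostile", "aggressive", "explode", "revenge"]
def KW_disgust : List String := ["disgusting", "gross", "sick", "vomit", "dirty", "ugly", "horrible",
  "nasty", "revolting", "filthy", "stink", "rot", "decay", "trash",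
  "repuls", "awful", "disturbing", "nauseating", "yuck", "creepy"]
def KW_fear : List String := ["scared", "afraid", "terror", "nightmare", "monster", "dark", "run",
  "chase", "hiding", "panic", "danger", "threat", "scream", "trap",
  "escape", "ghost", "shadow", "lost", "alone", "horror", "dread",
  "anxiety", "helpless", "frozen", "paralyz", "evil", "demon"]
def KW_happiness : List String := ["happy", "joy", "laugh", "smile", "love", "fun", "excited", "celebrate",
  "wonderful", "amazing", "beautiful", "warm", "hug", "peace", "free",
  "flying", "dance", "music", "friend", "family", "sunshine", "bright",
  "paradise", "perfect", "bliss", "delight", "content", "grateful"]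
def KW_sadness : List String := ["sad", "cry", "loss", "miss", "grief", "lonely", "tears", "hurt",
  "broken", "empty", "hopeless", "depress", "mourn", "goodbye", "death",
  "dead", "die", "regret", "disappoint", "forget", "left", "abandon",
  "reject", "fail", "lose", "gone", "never", "wish"]
def KW_neutral : List String := ["walk", "talk", "sit", "stand", "look", "see", "hear", "think",
  "normal", "ordinary", "usual", "everyday", "just", "simply"]

def EMOTION_KEYWORDS : PySem.Dict String (List String) :=
  PySem.Dict.ofList [("anger", KW_anger), ("disgust", KW_disgust), ("fear", KW_fear),
                     ("happiness", KW_happiness), ("sadness", KW_sadness), ("neutral", KW_neutral)]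

def get_top_emotion (text : String) : String :=
  let text_lowercase := PySem.Str.lower text
  let emotion_scores0 : PySem.Dict String Int :=
    EMOTION_KEYWORDS.keys.foldl (fun d e => d.insert e 0) PySem.Dict.empty
  let emotion_scores :=
    EMOTION_KEYWORDS.items.foldl (fun d ekw =>
      ekw.2.foldl (fun d w =>
        if PySem.Str.isIn w text_lowercase then d.insert ekw.1 (d.getD ekw.1 0 + 1) else d) d)
      emotion_scores0
  -- max(emotion_scores, key=emotion_scores.get): every iterated key is present, so .get is getD _ 0;
  -- the dict is never empty, so the `getD ""` default of max? is unreachable (totality guard only)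
  let top := (PySem.List.max? emotion_scores.keys (fun e => emotion_scores.getD e 0)).getD ""
  if emotion_scores.getD top 0 > 0 then top else "neutral"

-- ===== PORT B =====
-- B's own flat table: one space-separated keyword string per emotion, split at runtime
def KWS_alt : List (String × String) :=
  [("anger", "angry rage furious mad hate yell fight violent scream attack punch hit frustrat annoy resent bitter hostile aggressive explode revenge"),
   ("disgust", "disgusting gross sick vomit dirty ugly horrible nasty revolting filthy stink rot decay trash repuls awful disturbing nauseating yuck creepy"),
   ("fear", "scared afraid terror nightmare monster dark run chase hiding panic danger threat scream trap escape ghost shadow lost alone horror dread anxiety helpless frozen paralyz evil demon"),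
   ("happiness", "happy joy laugh smile love fun excited celebrate wonderful amazing beautiful warm hug peace free flying dance music friend family sunshine bright paradise perfect bliss delight content grateful"),
   ("sadness", "sad cry loss miss grief lonely tears hurt broken empty hopeless depress mourn goodbye death dead die regret disappoint forget left abandon reject fail lose gone never wish"),
   ("neutral", "walk talk sit stand look see hear think normal ordinary usual everyday just simply")]

-- _MAX_LEN = max(len(w) for _, ws in _KEYWORDS for w in ws.split())
def MAX_LEN : Int :=
  (PySem.List.max?
    (KWS_alt.flatMap (fun p => (PySem.Str.split₀ p.2).map (fun w => (PySem.Str.len w : Int))))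
    (fun x => x)).getD 0

def get_top_emotion_alt (text : String) : String :=
  let t := PySem.Str.lower text
  let n : Int := PySem.Str.len t
  let subs : PySem.Set String :=
    (PySem.List.pyRange 0 n).foldl (fun s i =>
      (PySem.List.pyRange 1 (min MAX_LEN (n - i) + 1)).foldl (fun s L =>
        PySem.Set.add s (PySem.Str.slice t (some i) (some (i + L)))) s)
      PySem.Set.empty
  let res :=
    KWS_alt.foldl (fun (acc : String × Int) ekw =>
      let score := (PySem.Str.split₀ ekw.2).foldl
        (fun sc w => if PySem.Set.contains subs w then sc + 1 else sc) (0 : Int)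
      if score > acc.2 then (ekw.1, score) else acc)
      ("neutral", 0)
  res.1

-- ===== PRECONDITION & SPEC =====
def Spec_get_top_emotion (text : String) (out : String) : Prop := out = get_top_emotion_alt text
instance (text : String) (out : String) : Decidable (Spec_get_top_emotion text out) := by unfold Spec_get_top_emotion; infer_instance

-- ===== CLAIM (what is proved, stated in full; the proofs are below) =====
def Claim_equal_get_top_emotion : Prop := ∀ (text : String), Dom_get_top_emotion text → Spec_get_top_emotion text (get_top_emotion text)

-- ===== LEMMAS AND PROOFS =====

set_option maxRecDepth 8192 in
theorem pvMaxLen : MAX_LEN = 10 := by decide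

-- B's runtime splits produce exactly A's keyword lists
set_option maxRecDepth 8192 in
theorem pvSplitA : PySem.Str.split₀ "angry rage furious mad hate yell fight violent scream attack punch hit frustrat annoy resent bitter hostile aggressive explode revenge" = KW_anger := by decide
set_option maxRecDepth 8192 in
theorem pvSplitD : PySem.Str.split₀ "disgusting gross sick vomit dirty ugly horrible nasty revolting filthy stink rot decay trash repuls awful disturbing nauseating yuck creepy" = KW_disgust := by decide
set_option maxRecDepth 8192 in
theorem pvSplitF : PySem.Str.split₀ "scared afraid terror nightmare monster dark run chase hiding panic danger threat scream trap escape ghost shadow lost alone horror dread anxiety helpless frozen paralyz evil demon" = KW_fear := by decide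
set_option maxRecDepth 8192 in
theorem pvSplitH : PySem.Str.split₀ "happy joy laugh smile love fun excited celebrate wonderful amazing beautiful warm hug peace free flying dance music friend family sunshine bright paradise perfect bliss delight content grateful" = KW_happiness := by decide
set_option maxRecDepth 8192 in
theorem pvSplitS : PySem.Str.split₀ "sad cry loss miss grief lonely tears hurt broken empty hopeless depress mourn goodbye death dead die regret disappoint forget left abandon reject fail lose gone never wish" = KW_sadness := by decide
set_option maxRecDepth 8192 in
theorem pvSplitN : PySem.Str.split₀ "walk talk sit stand look see hear think normal ordinary usual everyday just simply" = KW_neutral := by decide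

theorem pvStringExt {a b : String} (h : a.toList = b.toList) : a = b := String.ext h

-- membership in B's nested substring-building fold
theorem pvMemFold (t : String) (l : List Int) (n : Int) (s₀ : PySem.Set String) (y : String) :
    (y ∈ l.foldl (fun s i =>
      (PySem.List.pyRange 1 (min MAX_LEN (n - i) + 1)).foldl (fun s L =>
        PySem.Set.add s (PySem.Str.slice t (some i) (some (i + L)))) s) s₀)
    ↔ y ∈ s₀ ∨ ∃ i ∈ l, ∃ L ∈ PySem.List.pyRange 1 (min MAX_LEN (n - i) + 1),
        y = PySem.Str.slice t (some i) (some (i + L)) := by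
  induction l generalizing s₀ with
  | nil => simp
  | cons i l ih =>
    simp only [List.foldl_cons]
    rw [ih, PySem.Set.mem_foldl_add]
    simp only [List.mem_cons]
    constructor
    · rintro (⟨h | ⟨L, hL, rfl⟩⟩ | ⟨j, hj, L, hL, rfl⟩)
      · exact Or.inl h
      · exact Or.inr ⟨i, Or.inl rfl, L, hL, rfl⟩
      · exact Or.inr ⟨j, Or.inr hj, L, hL, rfl⟩
    · rintro (h | ⟨j, (rfl | hj), L, hL, rfl⟩)
      · exact Or.inl (Or.inl h)
      · exact Or.inl (Or.inr ⟨L, hL, rfl⟩)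
      · exact Or.inr ⟨j, hj, L, hL, rfl⟩

-- the substring index answers exactly "w in t" for every w of length 1..10
theorem pvMemSubs (t w : String) (h1 : 1 ≤ w.toList.length) (h2 : w.toList.length ≤ 10) :
    PySem.Set.contains
      ((PySem.List.pyRange 0 (PySem.Str.len t)).foldl (fun s i =>
        (PySem.List.pyRange 1 (min MAX_LEN (PySem.Str.len t - i) + 1)).foldl (fun s L =>
          PySem.Set.add s (PySem.Str.slice t (some i) (some (i + L)))) s)
        PySem.Set.empty) w
    = PySem.Str.isIn w t := by
  rw [Bool.eq_iff_iff, PySem.Set.contains_iff, pvMemFold, PySem.Str.isIn_eq,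
    ← PySem.Chars.exists_prefix_drop_iff_isIn]
  constructor
  · rintro (h | ⟨i, hi, L, hL, rfl⟩)
    · simp at h
    · rw [PySem.List.mem_pyRange_one] at hi hL
      refine ⟨i.toNat, ?_⟩
      rw [PySem.Str.toList_slice, PySem.Chars.slice_eq_listSlice,
        PySem.List.slice_toNat _ hi.1 (by omega)]
      exact List.take_prefix _ _
  · rintro ⟨j, hpre⟩
    have hlen : w.toList.length ≤ t.toList.length - j := by
      have := hpre.length_le
      simpa using this
    have hj : j < t.toList.length := by omega
    refine Or.inr ⟨(j : Int), ?_, (w.toList.length : Int), ?_, ?_⟩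
    · rw [PySem.List.mem_pyRange_one, PySem.Str.len_eq]
      constructor
      · positivity
      · exact_mod_cast hj
    · rw [PySem.List.mem_pyRange_one, pvMaxLen, PySem.Str.len_eq]
      constructor
      · exact_mod_cast h1
      · have h3 : (w.toList.length : Int) ≤ 10 := by exact_mod_cast h2
        have h4 : (w.toList.length : Int) ≤ (t.toList.length : Int) - (j : Int) := by
          omega
        omega
    · apply pvStringExt
      rw [PySem.Str.toList_slice, PySem.Chars.slice_eq_listSlice,
        PySem.List.slice_toNat _ (by positivity) (by positivity)]
      have e1 : ((j : Int) + (w.toList.length : Int)).toNat = j + w.toList.length := by omega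
      have e2 : ((j : Int)).toNat = j := by omega
      rw [e1, e2]
      have e3 : j + w.toList.length - j = w.toList.length := by omega
      rw [e3]
      exact List.prefix_iff_eq_take.mp hpre

-- A's inner loop over one emotion's keyword list, as a dict transformer
theorem pvFoldKeys (t e : String) (kws : List String) (d : PySem.Dict String Int)
    (he : d.contains e = true) :
    (kws.foldl (fun d w =>
      if PySem.Str.isIn w t then d.insert e (d.getD e 0 + 1) else d) d).keys = d.keys := by
  induction kws generalizing d with
  | nil => rfl
  | cons w ws ih =>
    simp only [List.foldl_cons]
    by_cases hp : PySem.Str.isIn w t = true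
    · rw [hp, if_pos rfl, ih _ (PySem.Dict.contains_insert_self d e (d.getD e 0 + 1))]
      simp [PySem.Dict.keys_insert_of_contains, he]
    · simp only [Bool.not_eq_true] at hp
      rw [hp]
      simpa using ih d he

theorem pvFoldGetD_ne (t e e' : String) (kws : List String) (d : PySem.Dict String Int)
    (hne : e' ≠ e) :
    (kws.foldl (fun d w =>
      if PySem.Str.isIn w t then d.insert e (d.getD e 0 + 1) else d) d).getD e' 0
    = d.getD e' 0 := by
  induction kws generalizing d with
  | nil => rfl
  | cons w ws ih =>
    simp only [List.foldl_cons]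
    by_cases hp : PySem.Str.isIn w t = true
    · rw [hp, if_pos rfl, ih, PySem.Dict.getD_insert, if_neg hne]
    · simp only [Bool.not_eq_true] at hp
      rw [hp]
      simpa using ih d

theorem pvFoldGetD_eq (t e : String) (kws : List String) (d : PySem.Dict String Int)
    (he : d.contains e = true) :
    (kws.foldl (fun d w =>
      if PySem.Str.isIn w t then d.insert e (d.getD e 0 + 1) else d) d).getD e 0
    = d.getD e 0 + (kws.countP (fun w => PySem.Str.isIn w t) : Int) := by
  induction kws generalizing d with
  | nil => simp
  | cons w ws ih =>
    simp only [List.foldl_cons, List.countP_cons]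
    by_cases hp : PySem.Str.isIn w t = true
    · rw [hp, if_pos rfl, ih _ (PySem.Dict.contains_insert_self d e (d.getD e 0 + 1)),
        PySem.Dict.getD_insert, if_pos rfl]
      simp [hp]
      ring
    · simp only [Bool.not_eq_true] at hp
      rw [hp]
      simpa using ih d he

theorem pvLenA : ∀ w ∈ KW_anger, 1 ≤ w.toList.length ∧ w.toList.length ≤ 10 := by decide
theorem pvLenD : ∀ w ∈ KW_disgust, 1 ≤ w.toList.length ∧ w.toList.length ≤ 10 := by decide
theorem pvLenF : ∀ w ∈ KW_fear, 1 ≤ w.toList.length ∧ w.toList.length ≤ 10 := by decide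
theorem pvLenH : ∀ w ∈ KW_happiness, 1 ≤ w.toList.length ∧ w.toList.length ≤ 10 := by decide
theorem pvLenS : ∀ w ∈ KW_sadness, 1 ≤ w.toList.length ∧ w.toList.length ≤ 10 := by decide
theorem pvLenN : ∀ w ∈ KW_neutral, 1 ≤ w.toList.length ∧ w.toList.length ≤ 10 := by decide

set_option maxRecDepth 8192 in
theorem pvItems : EMOTION_KEYWORDS.items =
    [("anger", KW_anger), ("disgust", KW_disgust), ("fear", KW_fear),
     ("happiness", KW_happiness), ("sadness", KW_sadness), ("neutral", KW_neutral)] := by decide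

-- running strict-max machinery relating Python's max(…, key=…) to B's fold
def pvStepA (K : String → Int) (m x : String) : String := if K m < K x then x else m
def pvRun (K : String → Int) (m : String) (l : List String) : String := l.foldl (pvStepA K) m

theorem pvRun_cons (K : String → Int) (m x : String) (l : List String) :
    pvRun K m (x :: l) = pvRun K (pvStepA K m x) l := rfl

theorem pvFoldSome (K : String → Int) (g : Option String → String → Option String)
    (hg : ∀ m x, g (some m) x = some (pvStepA K m x)) :
    ∀ (l : List String) (m : String), l.foldl g (some m) = some (pvRun K m l) := by
  intro l
  induction l with
  | nil => intro m; rfl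
  | cons x l ih =>
    intro m
    simp only [List.foldl_cons, hg, ih, pvRun_cons]

theorem pvOPT (K : String → Int) (x : String) (xs : List String) :
    PySem.List.max? (x :: xs) K = some (pvRun K x xs) := by
  unfold PySem.List.max?
  simp only [List.foldl_cons]
  refine pvFoldSome K _ (fun m y => ?_) xs x
  show (if K m < K y then some y else some m) = some (pvStepA K m y)
  unfold pvStepA
  by_cases h : K m < K y <;> simp [h]

theorem pvKmono (K : String → Int) (l : List String) : ∀ m, K m ≤ K (pvRun K m l) := by
  induction l with
  | nil => intro m; simp [pvRun]
  | cons x l ih =>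
    intro m
    rw [pvRun_cons]
    refine le_trans ?_ (ih _)
    unfold pvStepA
    by_cases h : K m < K x
    · simp [h]
      omega
    · simp [h]

theorem pvLINK (K : String → Int) (l : List String) : ∀ m : String,
    (l.map (fun x => (x, K x))).foldl (fun acc q => if q.2 > acc.2 then q else acc) (m, K m)
      = (pvRun K m l, K (pvRun K m l)) := by
  induction l with
  | nil => intro m; rfl
  | cons x l ih =>
    intro m
    simp only [List.map_cons, List.foldl_cons]
    have h : (if (x, K x).2 > (m, K m).2 then (x, K x) else (m, K m))
        = (pvStepA K m x, K (pvStepA K m x)) := by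
      unfold pvStepA; by_cases h : K m < K x <;> simp [h, gt_iff_lt]
    rw [h, ih, pvRun_cons]

theorem pvEQPOS (K : String → Int) (l : List String) : ∀ m x : String, K m ≤ 0 → K x ≤ 0 →
    (0 < K (pvRun K m l) ↔ 0 < K (pvRun K x l)) ∧
    (0 < K (pvRun K m l) → pvRun K m l = pvRun K x l) := by
  induction l with
  | nil =>
    intro m x hm hx
    simp only [pvRun, List.foldl_nil]
    exact ⟨by constructor <;> intro h <;> omega, fun h => absurd h (by omega)⟩
  | cons y l ih =>
    intro m x hm hx
    simp only [pvRun_cons]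
    by_cases hy : 0 < K y
    · have h1 : pvStepA K m y = y := by unfold pvStepA; simp [show K m < K y by omega]
      have h2 : pvStepA K x y = y := by unfold pvStepA; simp [show K x < K y by omega]
      rw [h1, h2]
      exact ⟨Iff.rfl, fun _ => rfl⟩
    · have hm' : K (pvStepA K m y) ≤ 0 := by
        unfold pvStepA; by_cases h : K m < K y <;> simp [h] <;> omega
      have hx' : K (pvStepA K x y) ≤ 0 := by
        unfold pvStepA; by_cases h : K x < K y <;> simp [h] <;> omega
      exact ih _ _ hm' hx'

theorem pvG (K : String → Int) (l : List String) : ∀ m : String,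
    (l.map (fun x => (x, K x))).foldl (fun acc q => if q.2 > acc.2 then q else acc)
        (if 0 < K m then (m, K m) else ("neutral", 0))
      = if 0 < K (pvRun K m l) then (pvRun K m l, K (pvRun K m l)) else ("neutral", 0) := by
  induction l with
  | nil => intro m; simp [pvRun]
  | cons x l ih =>
    intro m
    by_cases hm : 0 < K m
    · rw [if_pos hm, pvLINK K (x :: l) m]
      have hmo := pvKmono K (x :: l) m
      rw [if_pos (by omega)]
    · rw [if_neg hm, List.map_cons, List.foldl_cons]
      have hstep : (if (x, K x).2 > (("neutral", 0) : String × Int).2 then (x, K x)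
            else (("neutral", 0) : String × Int)) = if 0 < K x then (x, K x) else ("neutral", 0) := by
        by_cases hx : 0 < K x <;> simp [hx, gt_iff_lt]
      rw [hstep, ih x]
      simp only [pvRun_cons]
      by_cases hx : K m < K x
      · rw [show pvStepA K m x = x from by unfold pvStepA; simp [hx]]
      · rw [show pvStepA K m x = m from by unfold pvStepA; simp [hx]]
        obtain ⟨hiff, heq⟩ := pvEQPOS K l x m (by omega) (by omega)
        by_cases hpos : 0 < K (pvRun K x l)
        · rw [if_pos hpos, if_pos (hiff.mp hpos), heq hpos]
        · rw [if_neg hpos, if_neg (fun hh => hpos (hiff.mpr hh))]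

theorem pvStart (K : String → Int) (l : List String) (m : String) :
    (((m, K m) :: l.map (fun x => (x, K x))).foldl
        (fun acc q => if q.2 > acc.2 then q else acc) ("neutral", 0))
      = (l.map (fun x => (x, K x))).foldl (fun acc q => if q.2 > acc.2 then q else acc)
          (if 0 < K m then (m, K m) else ("neutral", 0)) := by
  simp only [List.foldl_cons]

theorem pvSelect (K : String → Int) (a b c d e f : Int)
    (h1 : K "anger" = a) (h2 : K "disgust" = b) (h3 : K "fear" = c)
    (h4 : K "happiness" = d) (h5 : K "sadness" = e) (h6 : K "neutral" = f) :
    (if K ((PySem.List.max? ["anger", "disgust", "fear", "happiness", "sadness", "neutral"] K).getD "") > 0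
     then (PySem.List.max? ["anger", "disgust", "fear", "happiness", "sadness", "neutral"] K).getD ""
     else "neutral")
    = (([("anger", a), ("disgust", b), ("fear", c), ("happiness", d), ("sadness", e), ("neutral", f)]
        : List (String × Int)).foldl (fun acc q => if q.2 > acc.2 then q else acc) ("neutral", 0)).1 := by
  rw [pvOPT]
  simp only [Option.getD_some]
  rw [← h1, ← h2, ← h3, ← h4, ← h5, ← h6]
  have hs := pvStart K ["disgust", "fear", "happiness", "sadness", "neutral"] "anger"
  simp only [List.map_cons, List.map_nil] at hs
  rw [hs]
  have hg := pvG K ["disgust", "fear", "happiness", "sadness", "neutral"] "anger"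
  simp only [List.map_cons, List.map_nil] at hg
  rw [hg]
  by_cases h : 0 < K (pvRun K "anger" ["disgust", "fear", "happiness", "sadness", "neutral"]) <;>
    simp [h, gt_iff_lt]

-- ===== VERDICT (by name: the statement is the Claim_ definition above) =====
set_option maxRecDepth 8192 in
set_option maxHeartbeats 1600000 in
theorem get_top_emotion_spec : Claim_equal_get_top_emotion := by
  intro text _
  unfold Spec_get_top_emotion
  simp only [get_top_emotion, get_top_emotion_alt, pvItems, KWS_alt,
    pvSplitA, pvSplitD, pvSplitF, pvSplitH, pvSplitS, pvSplitN,
    List.foldl_cons, List.foldl_nil]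
  set t := PySem.Str.lower text with ht
  set S0 : PySem.Dict String Int :=
    EMOTION_KEYWORDS.keys.foldl (fun d e => d.insert e 0) PySem.Dict.empty with hS0
  set subs : PySem.Set String :=
    (PySem.List.pyRange 0 (PySem.Str.len t)).foldl (fun s i =>
      (PySem.List.pyRange 1 (min MAX_LEN (PySem.Str.len t - i) + 1)).foldl (fun s L =>
        PySem.Set.add s (PySem.Str.slice t (some i) (some (i + L)))) s)
      PySem.Set.empty with hsubs
  set p := fun w => PySem.Str.isIn w t with hp
  set F := fun (e : String) (kws : List String) (d : PySem.Dict String Int) =>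
    kws.foldl (fun d w => if PySem.Str.isIn w t then d.insert e (d.getD e 0 + 1) else d) d with hF
  set d1 := F "anger" KW_anger S0 with hd1
  set d2 := F "disgust" KW_disgust d1 with hd2
  set d3 := F "fear" KW_fear d2 with hd3
  set d4 := F "happiness" KW_happiness d3 with hd4
  set d5 := F "sadness" KW_sadness d4 with hd5
  set d6 := F "neutral" KW_neutral d5 with hd6
  have hS0keys : S0.keys = ["anger", "disgust", "fear", "happiness", "sadness", "neutral"] := by
    rw [hS0]; decide
  have c1 : S0.contains "anger" = true := by rw [hS0]; decide
  have k1 : d1.keys = S0.keys := by rw [hd1, hF]; exact pvFoldKeys t "anger" KW_anger S0 c1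
  have c2 : d1.contains "disgust" = true := by
    rw [PySem.Dict.contains_eq_decide_mem_keys, k1, hS0keys]; decide
  have k2 : d2.keys = d1.keys := by rw [hd2, hF]; exact pvFoldKeys t "disgust" KW_disgust d1 c2
  have c3 : d2.contains "fear" = true := by
    rw [PySem.Dict.contains_eq_decide_mem_keys, k2, k1, hS0keys]; decide
  have k3 : d3.keys = d2.keys := by rw [hd3, hF]; exact pvFoldKeys t "fear" KW_fear d2 c3
  have c4 : d3.contains "happiness" = true := by
    rw [PySem.Dict.contains_eq_decide_mem_keys, k3, k2, k1, hS0keys]; decide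
  have k4 : d4.keys = d3.keys := by rw [hd4, hF]; exact pvFoldKeys t "happiness" KW_happiness d3 c4
  have c5 : d4.contains "sadness" = true := by
    rw [PySem.Dict.contains_eq_decide_mem_keys, k4, k3, k2, k1, hS0keys]; decide
  have k5 : d5.keys = d4.keys := by rw [hd5, hF]; exact pvFoldKeys t "sadness" KW_sadness d4 c5
  have c6 : d5.contains "neutral" = true := by
    rw [PySem.Dict.contains_eq_decide_mem_keys, k5, k4, k3, k2, k1, hS0keys]; decide
  have k6 : d6.keys = d5.keys := by rw [hd6, hF]; exact pvFoldKeys t "neutral" KW_neutral d5 c6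
  have hkeys6 : d6.keys = ["anger", "disgust", "fear", "happiness", "sadness", "neutral"] := by
    rw [k6, k5, k4, k3, k2, k1, hS0keys]
  -- the six final scores of A's dict
  have hg0a : S0.getD "anger" 0 = 0 := by rw [hS0]; decide
  have hg0b : S0.getD "disgust" 0 = 0 := by rw [hS0]; decide
  have hg0c : S0.getD "fear" 0 = 0 := by rw [hS0]; decide
  have hg0d : S0.getD "happiness" 0 = 0 := by rw [hS0]; decide
  have hg0e : S0.getD "sadness" 0 = 0 := by rw [hS0]; decide
  have hg0f : S0.getD "neutral" 0 = 0 := by rw [hS0]; decide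
  have gan : d6.getD "anger" 0 = (KW_anger.countP p : Int) := by
    rw [hd6, hF, pvFoldGetD_ne t "neutral" "anger" _ _ (by decide), hd5, hF,
      pvFoldGetD_ne t "sadness" "anger" _ _ (by decide), hd4, hF,
      pvFoldGetD_ne t "happiness" "anger" _ _ (by decide), hd3, hF,
      pvFoldGetD_ne t "fear" "anger" _ _ (by decide), hd2, hF,
      pvFoldGetD_ne t "disgust" "anger" _ _ (by decide), hd1, hF,
      pvFoldGetD_eq t "anger" _ _ c1, hg0a]
    simp [hp]
  have gdg : d6.getD "disgust" 0 = (KW_disgust.countP p : Int) := by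
    rw [hd6, hF, pvFoldGetD_ne t "neutral" "disgust" _ _ (by decide), hd5, hF,
      pvFoldGetD_ne t "sadness" "disgust" _ _ (by decide), hd4, hF,
      pvFoldGetD_ne t "happiness" "disgust" _ _ (by decide), hd3, hF,
      pvFoldGetD_ne t "fear" "disgust" _ _ (by decide), hd2, hF,
      pvFoldGetD_eq t "disgust" _ _ c2, hd1, hF,
      pvFoldGetD_ne t "anger" "disgust" _ _ (by decide), hg0b]
    simp [hp]
  have gfe : d6.getD "fear" 0 = (KW_fear.countP p : Int) := by
    rw [hd6, hF, pvFoldGetD_ne t "neutral" "fear" _ _ (by decide), hd5, hF,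
      pvFoldGetD_ne t "sadness" "fear" _ _ (by decide), hd4, hF,
      pvFoldGetD_ne t "happiness" "fear" _ _ (by decide), hd3, hF,
      pvFoldGetD_eq t "fear" _ _ c3, hd2, hF,
      pvFoldGetD_ne t "disgust" "fear" _ _ (by decide), hd1, hF,
      pvFoldGetD_ne t "anger" "fear" _ _ (by decide), hg0c]
    simp [hp]
  have gha : d6.getD "happiness" 0 = (KW_happiness.countP p : Int) := by
    rw [hd6, hF, pvFoldGetD_ne t "neutral" "happiness" _ _ (by decide), hd5, hF,
      pvFoldGetD_ne t "sadness" "happiness" _ _ (by decide), hd4, hF,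
      pvFoldGetD_eq t "happiness" _ _ c4, hd3, hF,
      pvFoldGetD_ne t "fear" "happiness" _ _ (by decide), hd2, hF,
      pvFoldGetD_ne t "disgust" "happiness" _ _ (by decide), hd1, hF,
      pvFoldGetD_ne t "anger" "happiness" _ _ (by decide), hg0d]
    simp [hp]
  have gsa : d6.getD "sadness" 0 = (KW_sadness.countP p : Int) := by
    rw [hd6, hF, pvFoldGetD_ne t "neutral" "sadness" _ _ (by decide), hd5, hF,
      pvFoldGetD_eq t "sadness" _ _ c5, hd4, hF,
      pvFoldGetD_ne t "happiness" "sadness" _ _ (by decide), hd3, hF,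
      pvFoldGetD_ne t "fear" "sadness" _ _ (by decide), hd2, hF,
      pvFoldGetD_ne t "disgust" "sadness" _ _ (by decide), hd1, hF,
      pvFoldGetD_ne t "anger" "sadness" _ _ (by decide), hg0e]
    simp [hp]
  have gne : d6.getD "neutral" 0 = (KW_neutral.countP p : Int) := by
    rw [hd6, hF, pvFoldGetD_eq t "neutral" _ _ c6, hd5, hF,
      pvFoldGetD_ne t "sadness" "neutral" _ _ (by decide), hd4, hF,
      pvFoldGetD_ne t "happiness" "neutral" _ _ (by decide), hd3, hF,
      pvFoldGetD_ne t "fear" "neutral" _ _ (by decide), hd2, hF,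
      pvFoldGetD_ne t "disgust" "neutral" _ _ (by decide), hd1, hF,
      pvFoldGetD_ne t "anger" "neutral" _ _ (by decide), hg0f]
    simp [hp]
  -- B's per-emotion scores equal the same counts
  have hscore : ∀ kws : List String, (∀ w ∈ kws, 1 ≤ w.toList.length ∧ w.toList.length ≤ 10) →
      kws.foldl (fun sc w => if PySem.Set.contains subs w then sc + 1 else sc) (0 : Int)
        = (kws.countP p : Int) := by
    intro kws hlen
    rw [PySem.List.foldl_congr_mem kws _
      (fun sc w => if PySem.Str.isIn w t then sc + 1 else sc) 0 ?_]
    · rw [hp]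
      have := PySem.List.foldl_count_if (fun w => PySem.Str.isIn w t) kws 0
      simpa using this
    · intro acc w hw
      have hb : PySem.Set.contains subs w = PySem.Str.isIn w t := by
        rw [hsubs]
        exact pvMemSubs t w (hlen w hw).1 (hlen w hw).2
      rw [hb]
  rw [hscore KW_anger pvLenA, hscore KW_disgust pvLenD, hscore KW_fear pvLenF,
    hscore KW_happiness pvLenH, hscore KW_sadness pvLenS, hscore KW_neutral pvLenN, hkeys6]
  exact pvSelect (fun e => d6.getD e 0) _ _ _ _ _ _ gan gdg gfe gha gsa gne
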